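-- pv_equiv track=rewrite | github.com/Gpaio574/Soundpad-Commander | Soundpad/keyboard_listener_keyboard.py | normalize_key_combination
-- ===== SOURCE A (Python) =====
-- from typing import Dict, List, Set, Callable, Optional, Tuple, Any
--
-- def normalize_key_combination(keys: List[str]) -> List[str]:
--     """
--     Normalize a list of key names to standard format.
--
--     Args:
--         keys: List of key names to normalize
--
--     Returns:
--         Normalized and sorted list of key names
--     """
--     normalized = []
--     for key in keys:
--         key = key.lower().strip()
--
--         # Handle common aliases
--         key_aliases = {
--             'control': 'ctrl',
--             'ctrl_l': 'ctrl',
--             'ctrl_r': 'ctrl',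
--             'alt_l': 'alt',
--             'alt_r': 'alt',
--             'shift_l': 'shift',
--             'shift_r': 'shift',
--             'cmd_l': 'cmd',
--             'cmd_r': 'cmd',
--             'windows': 'cmd',
--             'win': 'cmd'
--         }
--
--         key = key_aliases.get(key, key)
--
--         if key and key not in normalized:
--             normalized.append(key)
--
--     # Sort with modifiers first for consistent ordering
--     modifier_order = ['ctrl', 'alt', 'shift', 'cmd']
--
--     # Separate modifiers from other keys
--     modifiers = []
--     other_keys = []
--
--     for key in normalized:
--         if key.lower() in modifier_order:
--             modifiers.append(key.lower())
--         else:
--             other_keys.append(key)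
--
--     # Sort modifiers by predefined order
--     sorted_modifiers = []
--     for mod in modifier_order:
--         if mod in modifiers:
--             sorted_modifiers.append(mod)
--
--     # Combine modifiers first, then other keys sorted alphabetically
--     return sorted_modifiers + sorted(other_keys)
-- ===== SOURCE B (Python) =====
-- _ALIASES = {
--     'control': 'ctrl', 'ctrl_l': 'ctrl', 'ctrl_r': 'ctrl',
--     'alt_l': 'alt', 'alt_r': 'alt',
--     'shift_l': 'shift', 'shift_r': 'shift',
--     'cmd_l': 'cmd', 'cmd_r': 'cmd', 'windows': 'cmd', 'win': 'cmd',
-- }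
--
-- _MODIFIER_ORDER = ['ctrl', 'alt', 'shift', 'cmd']
--
--
-- def _canon(key):
--     k = key.lower().strip()
--     return _ALIASES.get(k, k)
--
--
-- def normalize_key_combination(keys):
--     """Normalize a list of key names: canonicalize, dedup, and order with
--     modifiers first (in ctrl/alt/shift/cmd order), other keys alphabetically."""
--     unique = {k for k in map(_canon, keys) if k}
--     return sorted(unique, key=lambda k: (
--         _MODIFIER_ORDER.index(k) if k in _MODIFIER_ORDER else len(_MODIFIER_ORDER),
--         '' if k in _MODIFIER_ORDER else k))
-- ===== Notes on version B (the rewrite author's own statement) =====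
-- stated objective: faster
-- what changed: A's three passes (membership-test dedup list, partition into modifiers/others, priority-order loop plus a separate alphabetical sort) are replaced by a set-comprehension dedup and a single sorted() call with a composite (rank, tie) key that puts modifiers first in ctrl/alt/shift/cmd order and everything else alphabetically.
import Mathlib
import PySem

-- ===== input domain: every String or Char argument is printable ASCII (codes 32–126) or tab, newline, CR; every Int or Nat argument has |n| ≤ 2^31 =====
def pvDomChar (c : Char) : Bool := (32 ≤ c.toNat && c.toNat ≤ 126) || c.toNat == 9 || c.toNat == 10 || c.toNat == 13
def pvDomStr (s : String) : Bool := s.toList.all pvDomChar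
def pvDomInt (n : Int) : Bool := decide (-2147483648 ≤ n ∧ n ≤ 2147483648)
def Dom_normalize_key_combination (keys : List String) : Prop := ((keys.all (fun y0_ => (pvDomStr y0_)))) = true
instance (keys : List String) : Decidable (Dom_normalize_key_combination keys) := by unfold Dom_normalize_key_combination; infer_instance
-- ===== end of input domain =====

-- B replaces A's three loops (dedup list, partition into modifiers/others, priority pass + separate
-- alphabetical sort) by a set-based dedup and ONE sorted() call with a composite (rank, tie) key;
-- objective: faster (hash-set dedup instead of A's quadratic list-membership dedup).

-- ===== PORT A =====
-- the key_aliases dict A rebuilds each iteration (a constant)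
def pvAliases : PySem.Dict String String :=
  PySem.Dict.ofList
  [("control","ctrl"),("ctrl_l","ctrl"),("ctrl_r","ctrl"),("alt_l","alt"),("alt_r","alt"),
   ("shift_l","shift"),("shift_r","shift"),("cmd_l","cmd"),("cmd_r","cmd"),
   ("windows","cmd"),("win","cmd")]

-- key = key.lower().strip(); key = key_aliases.get(key, key)
def pvNormA (key : String) : String :=
  let k := PySem.Str.strip (PySem.Str.lower key)
  PySem.Dict.getD pvAliases k k

def pvModOrder : List String := ["ctrl","alt","shift","cmd"]

def normalize_key_combination (keys : List String) : List String :=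
  -- first loop: normalize each key, drop empties, dedup by membership test
  let normalized := keys.foldl (fun acc key =>
      let k := pvNormA key
      if k ≠ "" ∧ k ∉ acc then acc ++ [k] else acc) []
  -- second loop: separate modifiers (lowercased) from other keys
  let pair := normalized.foldl (fun (p : List String × List String) key =>
      if PySem.Str.lower key ∈ pvModOrder then (p.1 ++ [PySem.Str.lower key], p.2)
      else (p.1, p.2 ++ [key])) (([] : List String), ([] : List String))
  -- third loop: modifiers in predefined order; then other keys sorted alphabetically
  let sorted_modifiers := pvModOrder.foldl (fun acc m =>
      if m ∈ pair.1 then acc ++ [m] else acc) []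
  sorted_modifiers ++ PySem.List.sorted pair.2 (fun x => x)

-- ===== PORT B =====
-- B's _canon helper: k = key.lower().strip(); return _ALIASES.get(k, k)
def pvCanon (key : String) : String :=
  let k := PySem.Str.strip (PySem.Str.lower key)
  PySem.Dict.getD pvAliases k k

-- _MODIFIER_ORDER.index(k) if k in _MODIFIER_ORDER else len(_MODIFIER_ORDER)
def pvRankB (k : String) : Int :=
  if pvModOrder.contains k then (((PySem.List.index? pvModOrder k).getD 0 : Nat) : Int)
  else (pvModOrder.length : Int)

-- '' if k in _MODIFIER_ORDER else k
def pvTieB (k : String) : String :=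
  if pvModOrder.contains k then "" else k

def normalize_key_combination_alt (keys : List String) : List String :=
  -- unique = {k for k in map(_canon, keys) if k}
  let unique : PySem.Set String := PySem.Set.ofList ((keys.map pvCanon).filter (fun k => decide (k ≠ "")))
  -- sorted(unique, key=lambda k: (rank, tie)) — this composite key is injective, so the
  -- result does not depend on the set's iteration order
  PySem.List.sorted2 unique pvRankB pvTieB

-- ===== PRECONDITION & SPEC =====
def Spec_normalize_key_combination (keys : List String) (out : List String) : Prop := out = normalize_key_combination_alt keys
instance (keys : List String) (out : List String) : Decidable (Spec_normalize_key_combination keys out) := by unfold Spec_normalize_key_combination; infer_instance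

-- ===== CLAIM (what is proved, stated in full; the proofs are below) =====
def Claim_equal_normalize_key_combination : Prop := ∀ (keys : List String), Dom_normalize_key_combination keys → Spec_normalize_key_combination keys (normalize_key_combination keys)

-- ===== LEMMAS AND PROOFS =====

lemma pvChar_le_iff (a b : Char) : a ≤ b ↔ a.toNat ≤ b.toNat := by
  rw [Char.le_def, UInt32.le_iff_toNat_le]; rfl

lemma pvLowerChar_toNat (c : Char) :
    (PySem.Chars.lowerChar c).toNat = if 65 ≤ c.toNat ∧ c.toNat ≤ 90 then c.toNat + 32 else c.toNat := by
  unfold PySem.Chars.lowerChar PySem.Chars.isupper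
  by_cases h : 65 ≤ c.toNat ∧ c.toNat ≤ 90
  · rw [if_pos, if_pos h]
    · rw [Char.toNat_ofNat, if_pos]
      exact Or.inl (by omega)
    · simp only [Bool.and_eq_true, decide_eq_true_iff, pvChar_le_iff]
      exact ⟨h.1, h.2⟩
  · rw [if_neg, if_neg h]
    simp only [Bool.and_eq_true, decide_eq_true_iff, pvChar_le_iff]
    intro hc; exact h ⟨hc.1, hc.2⟩

lemma pvIsspace_toNat (c d : Char) (h : c.toNat = d.toNat) : PySem.Chars.isspace c = PySem.Chars.isspace d := by
  unfold PySem.Chars.isspace; rw [h]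

lemma pvIsspace_lowerChar (c : Char) :
    PySem.Chars.isspace (PySem.Chars.lowerChar c) = PySem.Chars.isspace c := by
  by_cases h : 65 ≤ c.toNat ∧ c.toNat ≤ 90
  · have h1 : (PySem.Chars.lowerChar c).toNat = c.toNat + 32 := by rw [pvLowerChar_toNat, if_pos h]
    unfold PySem.Chars.isspace
    apply Bool.eq_iff_iff.mpr
    simp only [Bool.or_eq_true, Bool.and_eq_true, decide_eq_true_iff, h1]
    omega
  · exact pvIsspace_toNat _ _ (by rw [pvLowerChar_toNat, if_neg h])

lemma pvLowerChar_idem (c : Char) :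
    PySem.Chars.lowerChar (PySem.Chars.lowerChar c) = PySem.Chars.lowerChar c := by
  by_cases h : 65 ≤ c.toNat ∧ c.toNat ≤ 90
  · have h1 : (PySem.Chars.lowerChar c).toNat = c.toNat + 32 := by rw [pvLowerChar_toNat, if_pos h]
    show (if _ then _ else _) = _
    rw [if_neg]
    unfold PySem.Chars.isupper
    simp only [Bool.and_eq_true, decide_eq_true_iff, pvChar_le_iff, h1, not_and]
    have e1 : 'A'.toNat = 65 := rfl
    have e2 : 'Z'.toNat = 90 := rfl
    rw [e1, e2]; intro h2; omega
  · have h1 : PySem.Chars.lowerChar c = c := by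
      unfold PySem.Chars.lowerChar PySem.Chars.isupper
      rw [if_neg]
      simp only [Bool.and_eq_true, decide_eq_true_iff, pvChar_le_iff, not_and]
      intro h2 h3; exact h ⟨h2, h3⟩
    rw [h1, h1]

lemma pvLower_idem (cs : List Char) :
    PySem.Chars.lower (PySem.Chars.lower cs) = PySem.Chars.lower cs := by
  unfold PySem.Chars.lower
  rw [List.map_map]
  exact List.map_congr_left (fun c _ => pvLowerChar_idem c)

lemma pvLower_strip (cs : List Char) :
    PySem.Chars.lower (PySem.Chars.strip cs) = PySem.Chars.strip (PySem.Chars.lower cs) := by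
  have hcomp : (PySem.Chars.isspace ∘ PySem.Chars.lowerChar) = PySem.Chars.isspace :=
    funext pvIsspace_lowerChar
  unfold PySem.Chars.strip PySem.Chars.lstrip PySem.Chars.rstrip PySem.Chars.lower
  simp only [← List.map_reverse, List.dropWhile_map, hcomp]

lemma pvLower_strip_lower (s : String) :
    PySem.Str.lower (PySem.Str.strip (PySem.Str.lower s)) = PySem.Str.strip (PySem.Str.lower s) := by
  have h : (PySem.Str.lower (PySem.Str.strip (PySem.Str.lower s))).toList
      = (PySem.Str.strip (PySem.Str.lower s)).toList := by
    rw [PySem.Str.toList_lower, PySem.Str.toList_strip, PySem.Str.toList_lower,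
        pvLower_strip, pvLower_idem]
  exact String.toList_injective h

lemma pvLower_find (l : List (String × String)) (hd : ∀ p ∈ l, PySem.Str.lower p.2 = p.2)
    (k : String) (hk : PySem.Str.lower k = k) :
    PySem.Str.lower ((Option.map Prod.snd (List.find? (fun p => p.1 == k) l)).getD k)
      = (Option.map Prod.snd (List.find? (fun p => p.1 == k) l)).getD k := by
  induction l with
  | nil => simpa using hk
  | cons p t ih =>
      rw [List.find?_cons]
      cases h : (p.1 == k)
      · exact ih (fun q hq => hd q (List.mem_cons_of_mem _ hq))
      · simpa using hd p (List.mem_cons_self)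

lemma pvLower_normA (s : String) : PySem.Str.lower (pvNormA s) = pvNormA s := by
  unfold pvNormA PySem.Dict.getD PySem.Dict.get?
  exact pvLower_find pvAliases.items (by decide) _ (pvLower_strip_lower s)

-- the composite key, seen through the lexicographic order on Int × String
def pvKey (k : String) : Lex (Int × String) := toLex (pvRankB k, pvTieB k)

lemma pvNormalized_eq (keys : List String) :
    keys.foldl (fun acc key =>
      let k := pvNormA key
      if k ≠ "" ∧ k ∉ acc then acc ++ [k] else acc) [] =
    PySem.Set.ofList ((keys.map pvCanon).filter (fun k => decide (k ≠ ""))) := by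
  rw [PySem.Set.ofList_eq_foldl,
      ← PySem.List.foldl_ite_eq_foldl_filter (fun k => k ≠ "") PySem.Set.add,
      List.foldl_map]
  apply PySem.List.foldl_congr_mem
  intro acc x _
  show (if pvNormA x ≠ "" ∧ pvNormA x ∉ acc then acc ++ [pvNormA x] else acc) = _
  have hce : pvCanon x = pvNormA x := rfl
  rw [hce]
  by_cases h1 : pvNormA x = ""
  · rw [h1]; simp
  · by_cases h2 : pvNormA x ∈ acc
    · simp [PySem.Set.add, h1, h2]
    · simp [PySem.Set.add, h1, h2]

lemma pvSorted2_lex (xs : List String) :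
    PySem.List.sorted2 xs pvRankB pvTieB = PySem.List.sorted xs pvKey := by
  unfold PySem.List.sorted2 PySem.List.sorted
  simp only [if_neg (by decide : ¬ (false = true))]
  have hb : ∀ (a b : String),
      (decide (pvRankB a < pvRankB b) || (!decide (pvRankB b < pvRankB a) && decide (pvTieB a < pvTieB b)))
      = decide (pvKey a < pvKey b) := by
    intro a b
    apply Bool.eq_iff_iff.mpr
    simp only [Bool.or_eq_true, Bool.and_eq_true, Bool.not_eq_eq_eq_not, Bool.not_true,
      decide_eq_false_iff_not, decide_eq_true_iff, pvKey, Prod.Lex.toLex_lt_toLex]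
    constructor
    · rintro (h | ⟨h1, h2⟩)
      · exact Or.inl h
      · by_cases hab : pvRankB a < pvRankB b
        · exact Or.inl hab
        · exact Or.inr ⟨by omega, h2⟩
    · rintro (h | ⟨h1, h2⟩)
      · exact Or.inl h
      · exact Or.inr ⟨by omega, h2⟩
  congr 1
  funext acc x
  congr 1
  funext a b
  exact hb a b

lemma pvRank_tie_of_not_mem {k : String} (h : k ∉ pvModOrder) : pvRankB k = 4 ∧ pvTieB k = k := by
  have hc : pvModOrder.contains k = false := by simpa using h
  constructor
  · rw [pvRankB, if_neg (by simpa using h)]; rfl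
  · rw [pvTieB, if_neg (by simpa using h)]

lemma pvKey_lt_of_mod_other {a b : String} (ha : a ∈ pvModOrder) (hb : b ∉ pvModOrder) :
    pvKey a < pvKey b := by
  obtain ⟨h4, _⟩ := pvRank_tie_of_not_mem hb
  have h5 : pvRankB a < 4 := by
    fin_cases ha <;> decide
  exact Prod.Lex.toLex_lt_toLex.mpr (Or.inl (by rw [h4]; exact h5))

theorem pvMain (keys : List String) :
    normalize_key_combination keys = normalize_key_combination_alt keys := by
  unfold normalize_key_combination normalize_key_combination_alt
  simp only [pvNormalized_eq, pvSorted2_lex]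
  set N := PySem.Set.ofList ((keys.map pvCanon).filter (fun k => decide (k ≠ ""))) with hN
  have hlow : ∀ x ∈ N, PySem.Str.lower x = x := by
    intro x hx
    rw [hN, PySem.Set.mem_ofList, List.mem_filter, List.mem_map] at hx
    obtain ⟨⟨k, _, hk⟩, _⟩ := hx
    rw [← hk]
    exact pvLower_normA k
  -- split the pair-building loop into its two components
  have hfun : (fun (p : List String × List String) key =>
      if PySem.Str.lower key ∈ pvModOrder then (p.1 ++ [PySem.Str.lower key], p.2)
      else (p.1, p.2 ++ [key])) =
      (fun p key => ((fun a k => if PySem.Str.lower k ∈ pvModOrder then a ++ [PySem.Str.lower k] else a) p.1 key,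
                     (fun a k => if ¬ PySem.Str.lower k ∈ pvModOrder then a ++ [k] else a) p.2 key)) := by
    funext p key
    by_cases h : PySem.Str.lower key ∈ pvModOrder <;> simp [h]
  rw [hfun, PySem.List.foldl_prod_mk
        (f := fun a k => if PySem.Str.lower k ∈ pvModOrder then a ++ [PySem.Str.lower k] else a)
        (g := fun a k => if ¬ PySem.Str.lower k ∈ pvModOrder then a ++ [k] else a)]
  rw [PySem.List.foldl_append_ite (fun k => PySem.Str.lower k ∈ pvModOrder) PySem.Str.lower,
      PySem.List.foldl_append_ite_eq_filter (fun k => ¬ PySem.Str.lower k ∈ pvModOrder)]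
  simp only [List.nil_append]
  have hfc : N.filter (fun k => decide (PySem.Str.lower k ∈ pvModOrder)) =
      N.filter (fun k => decide (k ∈ pvModOrder)) :=
    List.filter_congr (fun x hx => by rw [hlow x hx])
  have hmapl : (N.filter (fun k => decide (k ∈ pvModOrder))).map PySem.Str.lower =
      N.filter (fun k => decide (k ∈ pvModOrder)) := by
    rw [List.map_congr_left (fun x hx => hlow x (List.mem_of_mem_filter hx))]
    simp
  have hoc : N.filter (fun k => decide (¬ PySem.Str.lower k ∈ pvModOrder)) =
      N.filter (fun k => !decide (k ∈ pvModOrder)) :=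
    List.filter_congr (fun x hx => by rw [hlow x hx, decide_not])
  rw [hfc, hmapl, hoc]
  set M := N.filter (fun k => decide (k ∈ pvModOrder)) with hM
  set O := N.filter (fun k => !decide (k ∈ pvModOrder)) with hO
  set SM := pvModOrder.filter (fun m => decide (m ∈ M)) with hSM
  have hsm2 : List.foldl (fun acc m => if m ∈ M then acc ++ [m] else acc) ([] : List String) pvModOrder = SM :=
    calc List.foldl (fun acc m => if m ∈ M then acc ++ [m] else acc) ([] : List String) pvModOrder
        = List.foldl (fun acc m => if decide (m ∈ M) then acc ++ [m] else acc) ([] : List String) pvModOrder :=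
          PySem.List.foldl_congr_mem _ _ _ _ (fun acc x _ => by by_cases h : x ∈ M <;> simp [h])
      _ = [] ++ pvModOrder.filter (fun m => decide (m ∈ M)) :=
          PySem.List.foldl_append_if_eq_filter _ _ _
      _ = SM := by rw [List.nil_append]
  refine Eq.trans (congrArg (fun l => l ++ PySem.List.sorted O (fun x => x)) hsm2) ?_
  -- nodup facts
  have hNnd : N.Nodup := PySem.Set.nodup_ofList _
  have hMnd : M.Nodup := hNnd.filter _
  have hOnd : O.Nodup := hNnd.filter _
  have hSMnd : SM.Nodup := (by decide : pvModOrder.Nodup).filter _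
  have hSp : (PySem.List.sorted O (fun x => x)).Perm O := PySem.List.sorted_perm O _ false
  -- permutation
  have p2 : SM.Perm M := by
    refine (List.perm_ext_iff_of_nodup hSMnd hMnd).mpr ?_
    intro a
    rw [hSM, hM]
    simp only [List.mem_filter, decide_eq_true_iff]
    tauto
  have hperm : (SM ++ PySem.List.sorted O (fun x => x)).Perm N := by
    refine (p2.append hSp).trans ?_
    rw [hM, hO]
    exact List.filter_append_perm _ N
  -- pairwise strictly-increasing keys
  have hOnot : ∀ x ∈ O, x ∉ pvModOrder := by
    intro x hx
    rw [hO] at hx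
    simp only [List.mem_filter, Bool.not_eq_eq_eq_not, Bool.not_true, decide_eq_false_iff_not] at hx
    exact hx.2
  have hmods : List.Pairwise (fun a b => pvKey a < pvKey b) pvModOrder := by
    have hr : List.Pairwise (fun a b => pvRankB a < pvRankB b) pvModOrder := by decide
    exact hr.imp (fun h => Prod.Lex.toLex_lt_toLex.mpr (Or.inl h))
  have hpw : List.Pairwise (fun a b => pvKey a < pvKey b) (SM ++ PySem.List.sorted O (fun x => x)) := by
    rw [List.pairwise_append]
    refine ⟨List.Pairwise.sublist (List.filter_sublist) hmods, ?_, ?_⟩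
    · have hle := PySem.List.sorted_pairwise O (fun x => x)
      have hnd : (PySem.List.sorted O (fun x => x)).Nodup := hSp.symm.nodup hOnd
      refine (hle.and hnd).imp_of_mem ?_
      intro a b ha hb hab
      have hna : a ∉ pvModOrder := hOnot a (hSp.mem_iff.mp ha)
      have hnb : b ∉ pvModOrder := hOnot b (hSp.mem_iff.mp hb)
      obtain ⟨ra, ta⟩ := pvRank_tie_of_not_mem hna
      obtain ⟨rb, tb⟩ := pvRank_tie_of_not_mem hnb
      refine Prod.Lex.toLex_lt_toLex.mpr (Or.inr ⟨by rw [ra, rb], ?_⟩)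
      show pvTieB a < pvTieB b
      rw [ta, tb]
      exact lt_of_le_of_ne hab.1 hab.2
    · intro a ha b hb
      have ha' : a ∈ pvModOrder := List.mem_of_mem_filter (hSM ▸ ha)
      have hb' : b ∉ pvModOrder := hOnot b (hSp.mem_iff.mp hb)
      exact pvKey_lt_of_mod_other ha' hb'
  exact (PySem.List.sorted_eq_of_perm_of_pairwise_lt N _ pvKey hperm hpw).symm

-- ===== VERDICT (by name: the statement is the Claim_ definition above) =====
theorem normalize_key_combination_spec : Claim_equal_normalize_key_combination := by
  intro keys _
  exact pvMain keys
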